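-- pv_equiv track=rewrite | github.com/madongge/IBI1_2023-24 | 转换.py | dna_to_mrna
-- ===== SOURCE A (Python) =====
-- def dna_to_mrna(dna_sequence):
--     """
--     将DNA序列转换为mRNA序列
--     参数：
--         dna_sequence：DNA序列（字符串）
--     返回值：
--         mRNA序列（字符串）
--     """
--     # 检查DNA序列是否只包含ATGC
--     valid_bases = set('ATGC')
--     if not set(dna_sequence) <= valid_bases:
--         raise ValueError("输入的序列包含无效的碱基，请确保输入的是有效的DNA序列。")
--
--     # 定义DNA到mRNA的转换规则
--     transcription_rule = {'A': 'U', 'T': 'A', 'G': 'C', 'C': 'G'}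
--
--     # 转换DNA序列为mRNA序列
--     mrna_sequence = ''
--     for base in dna_sequence:
--         mrna_sequence += transcription_rule.get(base, base)
--
--     return mrna_sequence
-- ===== SOURCE B (Python) =====
-- def dna_to_mrna(dna_sequence):
--     """Divide-and-conquer transcription: recurse on halves, transcribe at single-base leaves."""
--     rule = {'A': 'U', 'T': 'A', 'G': 'C', 'C': 'G'}
--
--     def trans(seq):
--         if len(seq) == 0:
--             return ''
--         if len(seq) == 1:
--             if seq not in rule:
--                 raise ValueError("输入的序列包含无效的碱基，请确保输入的是有效的DNA序列。")
--             return rule[seq]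
--         mid = len(seq) // 2
--         return trans(seq[:mid]) + trans(seq[mid:])
--
--     return trans(dna_sequence)
-- ===== Notes on version B (the rewrite author's own statement) =====
-- stated objective: alternative
-- what changed: B replaces A's set-subset validation pass plus left-to-right string-concatenation loop with a divide-and-conquer recursion that splits the sequence in half and transcribes (and validates) single bases at the leaves.
import Mathlib
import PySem

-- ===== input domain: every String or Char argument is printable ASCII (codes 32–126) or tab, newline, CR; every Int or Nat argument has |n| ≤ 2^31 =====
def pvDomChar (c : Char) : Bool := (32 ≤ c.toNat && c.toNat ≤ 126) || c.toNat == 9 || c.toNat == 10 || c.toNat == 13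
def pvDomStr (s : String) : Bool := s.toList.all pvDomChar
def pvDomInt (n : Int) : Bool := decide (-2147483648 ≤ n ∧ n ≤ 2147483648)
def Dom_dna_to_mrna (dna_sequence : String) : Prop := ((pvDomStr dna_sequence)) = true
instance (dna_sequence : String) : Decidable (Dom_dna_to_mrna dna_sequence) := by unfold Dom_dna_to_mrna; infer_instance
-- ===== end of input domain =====

-- B replaces A's subset-check pass + left-to-right concatenation loop with a
-- divide-and-conquer recursion (halve, recurse, concatenate); objective: alternative.


-- ===== PORT A =====
-- transcription_rule = {'A': 'U', 'T': 'A', 'G': 'C', 'C': 'G'}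
def pvRuleA : PySem.Dict Char Char :=
  PySem.Dict.ofList [('A', 'U'), ('T', 'A'), ('G', 'C'), ('C', 'G')]

def dna_to_mrna (dna_sequence : String) : String :=
  -- valid_bases = set('ATGC'); if not set(dna_sequence) <= valid_bases: raise ValueError
  let valid_bases : PySem.Set Char := PySem.Set.ofList "ATGC".toList
  if ¬ PySem.Set.issubset (PySem.Set.ofList dna_sequence.toList) valid_bases then
    ""  -- raise ValueError: excluded by Pre_dna_to_mrna
  else
    -- mrna_sequence = ''; for base in dna_sequence: mrna_sequence += rule.get(base, base)
    String.ofList (dna_sequence.toList.foldl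
      (fun acc base => acc ++ [pvRuleA.getD base base]) [])

-- ===== PORT B =====
-- def trans(seq): empty -> ''; single base -> rule[base] (raise if invalid);
--                 else trans(seq[:mid]) + trans(seq[mid:]) with mid = len(seq)//2
def pvTrans (l : List Char) : List Char :=
  match l with
  | [] => []
  | [b] =>
    match pvRuleA.get? b with
    | some m => [m]
    | none => []  -- raise ValueError: excluded by Pre_dna_to_mrna
  | a :: b :: rest =>
    pvTrans ((a :: b :: rest).take ((a :: b :: rest).length / 2)) ++
      pvTrans ((a :: b :: rest).drop ((a :: b :: rest).length / 2))
termination_by l.length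
decreasing_by
  all_goals simp [List.length_take, List.length_drop]; omega

def dna_to_mrna_alt (dna_sequence : String) : String :=
  String.ofList (pvTrans dna_sequence.toList)

-- ===== PRECONDITION & SPEC =====
-- A raises ValueError on any character outside 'ATGC'; Pre_ admits exactly valid DNA strings.
def Pre_dna_to_mrna (dna_sequence : String) : Prop :=
  dna_sequence.toList.all (fun c => c ∈ (['A', 'T', 'G', 'C'] : List Char)) = true
instance (dna_sequence : String) : Decidable (Pre_dna_to_mrna dna_sequence) := by
  unfold Pre_dna_to_mrna; infer_instance

def pvWitness_dna_to_mrna : String := "ATGCCAT"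

def Spec_dna_to_mrna (dna_sequence : String) (out : String) : Prop := out = dna_to_mrna_alt dna_sequence
instance (dna_sequence : String) (out : String) : Decidable (Spec_dna_to_mrna dna_sequence out) := by unfold Spec_dna_to_mrna; infer_instance

-- ===== CLAIM (what is proved, stated in full; the proofs are below) =====
def Claim_equal_dna_to_mrna : Prop := ∀ (dna_sequence : String), Dom_dna_to_mrna dna_sequence → Pre_dna_to_mrna dna_sequence → Spec_dna_to_mrna dna_sequence (dna_to_mrna dna_sequence)

-- ===== LEMMAS AND PROOFS =====

def pvValid (l : List Char) : Prop :=
  l.all (fun c => c ∈ (['A', 'T', 'G', 'C'] : List Char)) = true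

-- on a valid list, the subset check of A passes
lemma pv_subset_of_valid (l : List Char) (h : pvValid l) :
    PySem.Set.issubset (PySem.Set.ofList l) (PySem.Set.ofList "ATGC".toList) = true := by
  simp only [pvValid, List.all_eq_true, decide_eq_true_eq] at h
  rw [PySem.Set.issubset_iff]
  intro c hc
  have hc' : c ∈ l := (PySem.List.mem_dedup l c).mp hc
  exact (PySem.List.mem_dedup _ c).mpr (h c hc')

-- on a valid list, B's divide-and-conquer recursion computes the character-wise map
lemma pv_trans_eq_map (l : List Char) (h : pvValid l) :
    pvTrans l = l.map (fun c => pvRuleA.getD c c) := by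
  induction l using pvTrans.induct with
  | case1 => simp [pvTrans]
  | case2 b m hm =>
    have hb : b ∈ (['A', 'T', 'G', 'C'] : List Char) := by
      simpa [pvValid] using h
    fin_cases hb <;> simp only [pvTrans] <;> decide
  | case3 b hm =>
    have hb : b ∈ (['A', 'T', 'G', 'C'] : List Char) := by
      simpa [pvValid] using h
    fin_cases hb <;> exact absurd hm (by decide)
  | case4 a b rest ih1 ih2 =>
    have hv : pvValid ((a :: b :: rest).take ((a :: b :: rest).length / 2)) ∧
        pvValid ((a :: b :: rest).drop ((a :: b :: rest).length / 2)) := by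
      constructor <;>
        · simp only [pvValid, List.all_eq_true] at h ⊢
          intro c hc
          exact h c (by
            first
            | exact List.mem_of_mem_take hc
            | exact List.mem_of_mem_drop hc)
    rw [pvTrans, ih1 hv.1, ih2 hv.2, ← List.map_append, List.take_append_drop]

-- on a valid list, A's fold computes the same character-wise map
lemma pv_fold_eq_map (l : List Char) (acc : List Char) :
    l.foldl (fun acc base => acc ++ [pvRuleA.getD base base]) acc
      = acc ++ l.map (fun c => pvRuleA.getD c c) := by
  induction l generalizing acc with
  | nil => simp
  | cons c rest ih => simp [ih, List.append_assoc]

theorem pv_main (s : String) (hp : Pre_dna_to_mrna s) :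
    dna_to_mrna s = dna_to_mrna_alt s := by
  unfold dna_to_mrna dna_to_mrna_alt
  rw [if_neg (by rw [pv_subset_of_valid _ hp]; decide),
    pv_fold_eq_map, pv_trans_eq_map _ hp]
  rfl

-- ===== VERDICT (by name: the statement is the Claim_ definition above) =====
theorem dna_to_mrna_spec : Claim_equal_dna_to_mrna := by
  intro s _ hp
  unfold Spec_dna_to_mrna
  exact pv_main s hp
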